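-- pv_equiv track=rewrite | github.com/heisje/Algorithm_Study | heisje/20230918/부대복귀.py | solution
-- ===== SOURCE A (Python) =====
-- from collections import deque
--
-- def solution(N, roads, sources, destination):
--     answer = []
--     locs = [0 for _ in range(N+1)]
--     nodes = [[] for _ in range(N+1)]
--     for a, b in roads:
--         nodes[a].append(b)
--         nodes[b].append(a)
--
--     q = deque()
--     q.append((destination, 0))  # 갈곳, depth
--     visited = [-1 for _ in range(N+1)]
--     visited[destination] = 0
--
--     while q:
--         pre, depth = q.popleft()
--
--         for go in nodes[pre]:
--             if visited[go] == -1: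
--                 visited[go] = depth+1
--                 q.append((go, depth+1))
--
--     for s in sources:
--         answer.append(visited[s])
--     return answer
-- ===== SOURCE B (Python) =====
-- def solution(N, roads, sources, destination):
--     dist = [-1] * (N + 1)
--     dist[destination] = 0
--     for _ in range(N):
--         changed = False
--         for a, b in roads:
--             if dist[a] != -1 and (dist[b] == -1 or dist[b] > dist[a] + 1):
--                 dist[b] = dist[a] + 1
--                 changed = True
--             if dist[b] != -1 and (dist[a] == -1 or dist[a] > dist[b] + 1):
--                 dist[a] = dist[b] + 1
--                 changed = True
--         if not changed:
--             break
--     return [dist[s] for s in sources]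
-- ===== Notes on version B (the rewrite author's own statement) =====
-- stated objective: alternative
-- what changed: Replaces A's adjacency-list BFS with a queue by Bellman-Ford edge relaxation: no adjacency list and no queue are built; the raw road list is swept repeatedly, relaxing both directions of every edge until a sweep changes nothing (at most N sweeps).
import Mathlib
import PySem

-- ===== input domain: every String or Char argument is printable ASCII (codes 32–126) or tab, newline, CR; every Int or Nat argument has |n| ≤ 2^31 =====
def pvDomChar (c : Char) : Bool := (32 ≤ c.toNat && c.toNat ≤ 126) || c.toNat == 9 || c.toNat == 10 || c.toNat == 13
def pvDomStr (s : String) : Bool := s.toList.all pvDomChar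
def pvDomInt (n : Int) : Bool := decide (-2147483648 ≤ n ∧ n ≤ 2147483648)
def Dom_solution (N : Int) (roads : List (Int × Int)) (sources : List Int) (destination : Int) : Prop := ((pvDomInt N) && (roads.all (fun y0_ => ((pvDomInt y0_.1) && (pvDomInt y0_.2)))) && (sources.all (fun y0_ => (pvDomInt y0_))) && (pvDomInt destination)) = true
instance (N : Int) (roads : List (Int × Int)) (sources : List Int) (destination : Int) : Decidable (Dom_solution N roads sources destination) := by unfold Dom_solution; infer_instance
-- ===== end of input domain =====

-- B replaces A's adjacency-list + queue BFS by Bellman-Ford edge-list relaxation (no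
-- adjacency list, no queue; repeated sweeps over the raw road list until stable);
-- same return value — objective: alternative algorithm.

-- ===== PORT A =====
-- Python list read xs[i] / write xs[i] = x with negative-index wrap (exact via
-- PySem.List.pyGet?/pyIdx?; the default branch of `pyget` and the no-op branch of
-- `pyset` correspond to IndexError and are unreachable under Pre_solution).
def pyget {α : Type} (v : List α) (i : Int) (d : α) : α := (PySem.List.pyGet? v i).getD d
def pyset {α : Type} (v : List α) (i : Int) (x : α) : List α :=
  match PySem.List.pyIdx? v.length i with
  | some n => v.set n x
  | none => v

-- number of still-unvisited cells; the BFS termination measure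
def cnt (v : List Int) : Nat := v.count (-1)

-- loop body of A's inner `for go in nodes[pre]` (depth is a loop counter, always ≥ 0 in the
-- Python run, carried as Nat; the value written is the same integer depth+1)
def stepA (d : Nat) (s : List (Int × Nat) × List Int) (go : Int) : List (Int × Nat) × List Int :=
  if pyget s.2 go 0 = -1 then (s.1 ++ [(go, d + 1)], pyset s.2 go ((d : Int) + 1)) else s

-- `nodes[a].append(b); nodes[b].append(a)` over all roads
def buildNodes (N : Int) (roads : List (Int × Int)) : List (List Int) :=
  roads.foldl (fun nds r =>
    let nds := pyset nds r.1 (pyget nds r.1 [] ++ [r.2])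
    pyset nds r.2 (pyget nds r.2 [] ++ [r.1]))
    (List.replicate (N + 1).toNat [])

theorem pyget_neg_one {v : List Int} {i : Int} (h : pyget v i 0 = -1) :
    ∃ n, PySem.List.pyIdx? v.length i = some n ∧ ∃ hn : n < v.length, v[n] = -1 := by
  unfold pyget at h
  rw [show PySem.List.pyGet? v i = (PySem.List.pyIdx? v.length i).bind (fun n => v[n]?) by
    simp [PySem.List.pyGet?, PySem.List.pyIdx?]] at h
  cases hx : PySem.List.pyIdx? v.length i with
  | none => rw [hx] at h; simp at h
  | some n =>
    rw [hx] at h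
    have hn : n < v.length := by
      unfold PySem.List.pyIdx? at hx; split at hx <;> simp_all <;> omega
    refine ⟨n, rfl, hn, ?_⟩
    simpa [List.getElem?_eq_getElem hn] using h

theorem cnt_pyset_of_neg_one {v : List Int} {i x : Int} (h : pyget v i 0 = -1) (hx : x ≠ -1) :
    cnt (pyset v i x) + 1 = cnt v := by
  obtain ⟨n, hidx, hn, hv⟩ := pyget_neg_one h
  have hmem : (-1 : Int) ∈ v := hv ▸ List.getElem_mem hn
  have hc : 0 < v.count (-1) := List.count_pos_iff.mpr hmem
  unfold pyset cnt
  rw [hidx]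
  rw [List.count_set hn]
  simp [hv, hx]
  omega

-- the inner fold preserves (queue length + unvisited count); cited by `decreasing_by`
theorem stepA_fold_inv (d : Nat) (ns : List Int) (s : List (Int × Nat) × List Int) :
    (ns.foldl (stepA d) s).1.length + cnt (ns.foldl (stepA d) s).2 = s.1.length + cnt s.2 := by
  induction ns generalizing s with
  | nil => rfl
  | cons g t ih =>
    by_cases hg : pyget s.2 g 0 = -1
    · have hcnt := cnt_pyset_of_neg_one hg (x := (d : Int) + 1) (by omega)
      simp only [List.foldl_cons, stepA, hg, if_pos]
      rw [ih]
      simp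
      omega
    · simp only [List.foldl_cons, stepA, hg, ite_false]
      exact ih s

-- A's `while q:` loop
def bfsA (nodes : List (List Int)) (q : List (Int × Nat)) (visited : List Int) : List Int :=
  match q with
  | [] => visited
  | (pre, depth) :: rest =>
    let s := (pyget nodes pre []).foldl (stepA depth) (rest, visited)
    bfsA nodes s.1 s.2
termination_by q.length + cnt visited
decreasing_by
  have h := stepA_fold_inv depth (pyget nodes pre []) (rest, visited)
  simp_all

def solution (N : Int) (roads : List (Int × Int)) (sources : List Int) (destination : Int) : List Int :=
  let _locs := List.replicate (N + 1).toNat (0 : Int)  -- A's unused `locs`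
  let nodes := buildNodes N roads
  let visited := pyset (List.replicate (N + 1).toNat (-1 : Int)) destination 0
  let visited := bfsA nodes [(destination, 0)] visited
  sources.foldl (fun ans s => ans ++ [pyget visited s 0]) []

-- ===== PORT B =====
-- body of B's `for a, b in roads:` — relax the edge in both directions; state = (dist, changed)
def relaxEdge (s : List Int × Bool) (r : Int × Int) : List Int × Bool :=
  let s := if pyget s.1 r.1 0 ≠ -1 ∧ (pyget s.1 r.2 0 = -1 ∨ pyget s.1 r.1 0 + 1 < pyget s.1 r.2 0)
           then (pyset s.1 r.2 (pyget s.1 r.1 0 + 1), true) else s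
  if pyget s.1 r.2 0 ≠ -1 ∧ (pyget s.1 r.1 0 = -1 ∨ pyget s.1 r.2 0 + 1 < pyget s.1 r.1 0)
  then (pyset s.1 r.1 (pyget s.1 r.2 0 + 1), true) else s

-- one full sweep over the road list (`changed` starts False)
def passB (roads : List (Int × Int)) (dist : List Int) : List Int × Bool :=
  roads.foldl relaxEdge (dist, false)

-- B's `for _ in range(N): … ; if not changed: break`
def roundsB (roads : List (Int × Int)) (k : Nat) (dist : List Int) : List Int :=
  match k with
  | 0 => dist
  | k + 1 =>
    let s := passB roads dist
    if s.2 then roundsB roads k s.1 else s.1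

def solution_alt (N : Int) (roads : List (Int × Int)) (sources : List Int) (destination : Int) : List Int :=
  let dist := pyset (List.replicate (N + 1).toNat (-1 : Int)) destination 0
  let dist := roundsB roads N.toNat dist
  sources.map (fun s => pyget dist s 0)

-- ===== PRECONDITION & SPEC =====
-- Pre_ excludes exactly the inputs where Python A raises IndexError: a negative node count,
-- or a road endpoint / source / destination outside the valid index range [-(N+1), N].
def Pre_solution (N : Int) (roads : List (Int × Int)) (sources : List Int) (destination : Int) : Prop :=
  0 ≤ N ∧ (∀ r ∈ roads, -(N + 1) ≤ r.1 ∧ r.1 ≤ N ∧ -(N + 1) ≤ r.2 ∧ r.2 ≤ N) ∧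
    (-(N + 1) ≤ destination ∧ destination ≤ N) ∧ (∀ s ∈ sources, -(N + 1) ≤ s ∧ s ≤ N)
instance (N : Int) (roads : List (Int × Int)) (sources : List Int) (destination : Int) : Decidable (Pre_solution N roads sources destination) := by unfold Pre_solution; infer_instance

def pvWitness_solution : Int × (List (Int × Int)) × List Int × Int := (3, [(1, 2), (2, 3)], [1, 3], 2)

def Spec_solution (N : Int) (roads : List (Int × Int)) (sources : List Int) (destination : Int) (out : List Int) : Prop := out = solution_alt N roads sources destination
instance (N : Int) (roads : List (Int × Int)) (sources : List Int) (destination : Int) (out : List Int) : Decidable (Spec_solution N roads sources destination out) := by unfold Spec_solution; infer_instance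

-- ===== CLAIM (what is proved, stated in full; the proofs are below) =====
def Claim_equal_solution : Prop := ∀ (N : Int) (roads : List (Int × Int)) (sources : List Int) (destination : Int), Dom_solution N roads sources destination → Pre_solution N roads sources destination → Spec_solution N roads sources destination (solution N roads sources destination)

-- ===== LEMMAS AND PROOFS =====

-- ---- Python indexing, normalized ----
-- normalized (wrapped) cell index of Python index a into a list of length L
def nrm (L : Nat) (a : Int) : Nat := (PySem.List.pyIdx? L a).getD 0

theorem pyIdx_eq_nrm (L : Nat) (a : Int) (h1 : -(L : Int) ≤ a) (h2 : a < L) :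
    PySem.List.pyIdx? L a = some (nrm L a) := by
  unfold nrm PySem.List.pyIdx?
  split_ifs <;> simp_all <;> omega

theorem nrm_lt (L : Nat) (a : Int) (hL : 0 < L) : nrm L a < L := by
  unfold nrm PySem.List.pyIdx?
  split_ifs <;> simp_all <;> omega

theorem pyget_eq {v : List Int} {L : Nat} (a : Int) (d : Int) (hv : v.length = L)
    (h1 : -(L : Int) ≤ a) (h2 : a < L) : pyget v a d = v.getD (nrm L a) d := by
  have hlt : nrm L a < L := nrm_lt L a (by omega)
  unfold pyget PySem.List.pyGet?
  rw [hv, pyIdx_eq_nrm L a h1 h2]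
  simp [List.getD, hv]

theorem pyset_eq {v : List Int} {L : Nat} (a : Int) (x : Int) (hv : v.length = L)
    (h1 : -(L : Int) ≤ a) (h2 : a < L) : pyset v a x = v.set (nrm L a) x := by
  unfold pyset
  rw [hv, pyIdx_eq_nrm L a h1 h2]

theorem pygetl_eq {v : List (List Int)} {L : Nat} (a : Int) (d : List Int) (hv : v.length = L)
    (h1 : -(L : Int) ≤ a) (h2 : a < L) : pyget v a d = v.getD (nrm L a) d := by
  have hlt : nrm L a < L := nrm_lt L a (by omega)
  unfold pyget PySem.List.pyGet?
  rw [hv, pyIdx_eq_nrm L a h1 h2]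
  simp [List.getD, hv]

theorem pysetl_eq {v : List (List Int)} {L : Nat} (a : Int) (x : List Int) (hv : v.length = L)
    (h1 : -(L : Int) ≤ a) (h2 : a < L) : pyset v a x = v.set (nrm L a) x := by
  unfold pyset
  rw [hv, pyIdx_eq_nrm L a h1 h2]

-- ---- the graph and BFS distances ----
-- raw adjacency list of normalized node i
def nbr (nodes : List (List Int)) (i : Nat) : List Int := nodes.getD i []

def adjP (L : Nat) (nodes : List (List Int)) (i j : Nat) : Prop :=
  ∃ x ∈ nbr nodes i, nrm L x = j

-- there is a walk of length d from t to i
def ReachN (L : Nat) (nodes : List (List Int)) (t : Nat) : Nat → Nat → Prop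
  | 0, i => i = t
  | d + 1, i => ∃ j, ReachN L nodes t d j ∧ adjP L nodes j i

-- d is the exact BFS distance of i
def minR (L : Nat) (nodes : List (List Int)) (t : Nat) (d i : Nat) : Prop :=
  ReachN L nodes t d i ∧ ∀ d' < d, ¬ ReachN L nodes t d' i

-- the characterization both final arrays satisfy
def GoodV (L : Nat) (nodes : List (List Int)) (t : Nat) (v : List Int) : Prop :=
  v.length = L ∧ ∀ i, i < L →
    (∀ d, minR L nodes t d i → v.getD i 0 = (d : Int)) ∧
    ((¬ ∃ d, ReachN L nodes t d i) → v.getD i 0 = -1)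

theorem nat_exists_min {P : Nat → Prop} (h : ∃ d, P d) : ∃ d, P d ∧ ∀ d' < d, ¬ P d' := by
  classical
  exact ⟨Nat.find h, Nat.find_spec h, fun d' h' => Nat.find_min h h'⟩

theorem reach_lt {L : Nat} {nodes : List (List Int)} {t : Nat} (hL : 0 < L) (ht : t < L)
    {d i : Nat} (h : ReachN L nodes t d i) : i < L := by
  cases d with
  | zero => simp only [ReachN] at h; omega
  | succ d =>
    obtain ⟨j, _, x, _, hx⟩ := h
    exact hx ▸ nrm_lt L x hL

theorem reach_to_min {L : Nat} {nodes : List (List Int)} {t : Nat} {d i : Nat}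
    (h : ReachN L nodes t d i) : ∃ m, m ≤ d ∧ minR L nodes t m i := by
  obtain ⟨m, hm, hmin⟩ := nat_exists_min (P := fun m => ReachN L nodes t m i) ⟨d, h⟩
  refine ⟨m, ?_, hm, hmin⟩
  by_contra hc
  exact hmin d (by omega) h

theorem minR_unique {L : Nat} {nodes : List (List Int)} {t : Nat} {d d' i : Nat}
    (h : minR L nodes t d i) (h' : minR L nodes t d' i) : d = d' := by
  rcases h with ⟨h1, h2⟩; rcases h' with ⟨h1', h2'⟩
  by_contra hne
  rcases Nat.lt_or_ge d d' with hlt | hge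
  · exact h2' d hlt h1
  · exact h2 d' (by omega) h1'

theorem minR_ge_of_reach {L : Nat} {nodes : List (List Int)} {t : Nat} {m e i : Nat}
    (h : minR L nodes t m i) (he : ReachN L nodes t e i) : m ≤ e := by
  by_contra hc
  exact h.2 e (by omega) he

theorem minR_pred {L : Nat} {nodes : List (List Int)} {t : Nat} {d i : Nat}
    (h : minR L nodes t (d + 1) i) : ∃ j, minR L nodes t d j ∧ adjP L nodes j i := by
  obtain ⟨⟨j, hj, hadj⟩, hmin⟩ := h
  obtain ⟨m, hm, hminj⟩ := reach_to_min hj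
  refine ⟨j, ?_, hadj⟩
  rcases Nat.lt_or_ge m d with hlt | hge
  · exfalso
    exact hmin (m + 1) (by omega) ⟨j, hminj.1, hadj⟩
  · have : m = d := by omega
    exact this ▸ hminj

theorem no_min_above {L : Nat} {nodes : List (List Int)} {t : Nat} {d : Nat}
    (h : ∀ i, ¬ minR L nodes t d i) : ∀ e, d ≤ e → ∀ i, ¬ minR L nodes t e i := by
  intro e
  induction e with
  | zero => 
    intro he i
    have hd : d = 0 := by omega
    subst hd
    exact h i
  | succ e ih =>
    intro he i hmin
    rcases Nat.lt_or_ge e d with hlt | hge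
    · have : d = e + 1 := by omega
      exact h i (this ▸ hmin)
    · obtain ⟨j, hj, _⟩ := minR_pred hmin
      exact ih hge j hj

theorem goodV_unique {L : Nat} {nodes : List (List Int)} {t : Nat} {v w : List Int}
    (hv : GoodV L nodes t v) (hw : GoodV L nodes t w) : v = w := by
  obtain ⟨hvl, hvp⟩ := hv
  obtain ⟨hwl, hwp⟩ := hw
  apply List.ext_getElem (by omega)
  intro i hi1 hi2
  have hiL : i < L := by omega
  have hgv : v.getD i 0 = v[i] := List.getD_eq_getElem v 0 hi1
  have hgw : w.getD i 0 = w[i] := List.getD_eq_getElem w 0 hi2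
  by_cases hr : ∃ d, ReachN L nodes t d i
  · obtain ⟨d, hd⟩ := hr
    obtain ⟨m, _, hm⟩ := reach_to_min hd
    have := (hvp i hiL).1 m hm
    have := (hwp i hiL).1 m hm
    omega
  · have := (hvp i hiL).2 hr
    have := (hwp i hiL).2 hr
    omega

-- ---- the adjacency structure built by both versions ----
def RB (L : Nat) (roads : List (Int × Int)) : Prop :=
  ∀ r ∈ roads, -(L : Int) ≤ r.1 ∧ r.1 < L ∧ -(L : Int) ≤ r.2 ∧ r.2 < L

theorem getD_set_self {α : Type} (v : List α) (j : Nat) (x d : α) (h : j < v.length) :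
    (v.set j x).getD j d = x := by
  simp [List.getD, List.getElem?_set, h]

theorem getD_set_ne {α : Type} (v : List α) (i j : Nat) (x : α) (d : α) (h : i ≠ j) :
    (v.set j x).getD i d = v.getD i d := by
  simp [List.getD, List.getElem?_set, Ne.symm h]

theorem length_pyset {α : Type} (v : List α) (a : Int) (x : α) :
    (pyset v a x).length = v.length := by
  unfold pyset
  cases PySem.List.pyIdx? v.length a <;> simp

def bnStep (nds : List (List Int)) (r : Int × Int) : List (List Int) :=
  let nds := pyset nds r.1 (pyget nds r.1 [] ++ [r.2])
  pyset nds r.2 (pyget nds r.2 [] ++ [r.1])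

theorem buildNodes_eq (N : Int) (roads : List (Int × Int)) :
    buildNodes N roads = roads.foldl bnStep (List.replicate (N + 1).toNat []) := rfl

theorem length_bnStep (nds : List (List Int)) (r : Int × Int) :
    (bnStep nds r).length = nds.length := by
  unfold bnStep
  simp [length_pyset]

theorem length_foldl_bnStep (rds : List (Int × Int)) (nds : List (List Int)) :
    (rds.foldl bnStep nds).length = nds.length := by
  induction rds generalizing nds with
  | nil => rfl
  | cons r t ih => simpa [length_bnStep] using ih (bnStep nds r)

theorem length_buildNodes (N : Int) (roads : List (Int × Int)) :
    (buildNodes N roads).length = (N + 1).toNat := by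
  rw [buildNodes_eq, length_foldl_bnStep]
  simp

theorem nbr_oob {nds : List (List Int)} {i : Nat} (h : nds.length ≤ i) : nbr nds i = [] := by
  unfold nbr
  simp [List.getD, List.getElem?_eq_none (by omega : nds.length ≤ i)]

theorem mem_nbr_bnStep {L : Nat} {nds : List (List Int)} {r : Int × Int}
    (hL : 0 < L) (hlen : nds.length = L)
    (hb : -(L : Int) ≤ r.1 ∧ r.1 < L ∧ -(L : Int) ≤ r.2 ∧ r.2 < L) (i : Nat) (x : Int) :
    x ∈ nbr (bnStep nds r) i ↔
      x ∈ nbr nds i ∨ (nrm L r.1 = i ∧ x = r.2) ∨ (nrm L r.2 = i ∧ x = r.1) := by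
  obtain ⟨h1, h2, h3, h4⟩ := hb
  have hna : nrm L r.1 < L := nrm_lt L r.1 hL
  have hnb : nrm L r.2 < L := nrm_lt L r.2 hL
  have e1 : pyget nds r.1 ([] : List Int) = nbr nds (nrm L r.1) := pygetl_eq r.1 [] hlen h1 h2
  have step1 : bnStep nds r
      = pyset (nds.set (nrm L r.1) (nbr nds (nrm L r.1) ++ [r.2])) r.2
          (pyget (nds.set (nrm L r.1) (nbr nds (nrm L r.1) ++ [r.2])) r.2 [] ++ [r.1]) := by
    unfold bnStep
    rw [e1, pysetl_eq r.1 _ hlen h1 h2]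
  set nds1 := nds.set (nrm L r.1) (nbr nds (nrm L r.1) ++ [r.2]) with hnds1
  have hlen1 : nds1.length = L := by simp [hnds1, hlen]
  have e2 : pyget nds1 r.2 ([] : List Int) = nbr nds1 (nrm L r.2) := pygetl_eq r.2 [] hlen1 h3 h4
  have step2 : bnStep nds r = nds1.set (nrm L r.2) (nbr nds1 (nrm L r.2) ++ [r.1]) := by
    rw [step1, e2, pysetl_eq r.2 _ hlen1 h3 h4]
  rw [step2]
  by_cases hiL : i < L
  · have hnbr1 : ∀ j, j < L → nbr nds1 j = if j = nrm L r.1 then nbr nds (nrm L r.1) ++ [r.2] else nbr nds j := by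
      intro j hj
      simp only [nbr, hnds1]
      by_cases hj1 : j = nrm L r.1
      · rw [if_pos hj1, hj1, getD_set_self _ _ _ _ (by omega)]
      · rw [if_neg hj1, getD_set_ne _ _ _ _ _ hj1]
    have hfin : nbr (nds1.set (nrm L r.2) (nbr nds1 (nrm L r.2) ++ [r.1])) i
        = if i = nrm L r.2 then nbr nds1 (nrm L r.2) ++ [r.1] else nbr nds1 i := by
      simp only [nbr]
      by_cases hi2 : i = nrm L r.2
      · rw [if_pos hi2, hi2, getD_set_self _ _ _ _ (by omega)]
      · rw [if_neg hi2, getD_set_ne _ _ _ _ _ hi2]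
    rw [hfin, hnbr1 (nrm L r.2) hnb, hnbr1 i hiL]
    split_ifs <;> simp_all [List.mem_append] <;> tauto
  · have hoob : (nds1.set (nrm L r.2) (nbr nds1 (nrm L r.2) ++ [r.1])).length ≤ i := by
      simp [hlen1]; omega
    rw [nbr_oob hoob, nbr_oob (by omega : nds.length ≤ i)]
    constructor
    · intro h; simp at h
    · rintro (h | ⟨h, _⟩ | ⟨h, _⟩)
      · simp at h
      · omega
      · omega

theorem mem_nbr_buildNodes {N : Int} {roads : List (Int × Int)} {L : Nat}
    (hLdef : L = (N + 1).toNat) (hL : 0 < L) (hb : RB L roads) (i : Nat) (x : Int) :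
    x ∈ nbr (buildNodes N roads) i ↔
      ∃ r ∈ roads, (nrm L r.1 = i ∧ x = r.2) ∨ (nrm L r.2 = i ∧ x = r.1) := by
  rw [buildNodes_eq]
  have main : ∀ (rds : List (Int × Int)) (nds : List (List Int)), nds.length = L → RB L rds →
      (x ∈ nbr (rds.foldl bnStep nds) i ↔
        x ∈ nbr nds i ∨ ∃ r ∈ rds, (nrm L r.1 = i ∧ x = r.2) ∨ (nrm L r.2 = i ∧ x = r.1)) := by
    intro rds
    induction rds with
    | nil => intro nds _ _; simp
    | cons r t ih =>
      intro nds hlen hbb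
      have hr := hbb r (by simp)
      have ht : RB L t := fun r' hr' => hbb r' (by simp [hr'])
      simp only [List.foldl_cons]
      rw [ih (bnStep nds r) (by simp [length_bnStep, hlen]) ht,
        mem_nbr_bnStep hL hlen ⟨hr.1, hr.2.1, hr.2.2.1, hr.2.2.2⟩ i x]
      simp only [List.mem_cons]
      constructor
      · rintro ((h | h | h) | ⟨r', hr', h⟩)
        · exact Or.inl h
        · exact Or.inr ⟨r, Or.inl rfl, Or.inl h⟩
        · exact Or.inr ⟨r, Or.inl rfl, Or.inr h⟩
        · exact Or.inr ⟨r', Or.inr hr', h⟩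
      · rintro (h | ⟨r', hr' | hr', h⟩)
        · exact Or.inl (Or.inl h)
        · subst hr'; rcases h with h | h
          · exact Or.inl (Or.inr (Or.inl h))
          · exact Or.inl (Or.inr (Or.inr h))
        · exact Or.inr ⟨r', hr', h⟩
  have hrepl : (List.replicate (N + 1).toNat ([] : List Int)).length = L := by simp [hLdef]
  rw [main roads _ hrepl hb]
  have hnil : nbr (List.replicate (N + 1).toNat ([] : List Int)) i = [] := by
    unfold nbr
    simp only [List.getD, List.getElem?_replicate]
    split <;> simp
  rw [hnil]
  simp

theorem nbr_bounds {N : Int} {roads : List (Int × Int)} {L : Nat}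
    (hLdef : L = (N + 1).toNat) (hL : 0 < L) (hb : RB L roads) (i : Nat) (x : Int)
    (hx : x ∈ nbr (buildNodes N roads) i) : -(L : Int) ≤ x ∧ x < L := by
  rw [mem_nbr_buildNodes hLdef hL hb i x] at hx
  obtain ⟨r, hr, h⟩ := hx
  rcases h with ⟨_, hx⟩ | ⟨_, hx⟩ <;> rcases hb r hr with ⟨a1, a2, b1, b2⟩ <;> subst hx
  · exact ⟨b1, b2⟩
  · exact ⟨a1, a2⟩

theorem road_adj {N : Int} {roads : List (Int × Int)} {L : Nat}
    (hLdef : L = (N + 1).toNat) (hL : 0 < L) (hb : RB L roads) {r : Int × Int} (hr : r ∈ roads) :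
    adjP L (buildNodes N roads) (nrm L r.1) (nrm L r.2) ∧
      adjP L (buildNodes N roads) (nrm L r.2) (nrm L r.1) := by
  constructor
  · exact ⟨r.2, (mem_nbr_buildNodes hLdef hL hb _ _).mpr ⟨r, hr, Or.inl ⟨rfl, rfl⟩⟩, rfl⟩
  · exact ⟨r.1, (mem_nbr_buildNodes hLdef hL hb _ _).mpr ⟨r, hr, Or.inr ⟨rfl, rfl⟩⟩, rfl⟩

-- ---- level-synchronous BFS (proof-side intermediate between A's queue BFS and the spec) ----
def stepB (d : Nat) (s : List Int × List Int) (go : Int) : List Int × List Int :=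
  if pyget s.2 go 0 = -1 then (s.1 ++ [go], pyset s.2 go ((d : Int) + 1)) else s

def levelStep (nodes : List (List Int)) (d : Nat) (s : List Int × List Int) (pre : Int) :
    List Int × List Int :=
  (pyget nodes pre []).foldl (stepB d) s

theorem stepB_fold_inv (d : Nat) (ns : List Int) (s : List Int × List Int) :
    (ns.foldl (stepB d) s).1.length + cnt (ns.foldl (stepB d) s).2 = s.1.length + cnt s.2 := by
  induction ns generalizing s with
  | nil => rfl
  | cons g t ih =>
    by_cases hg : pyget s.2 g 0 = -1
    · have hcnt := cnt_pyset_of_neg_one hg (x := (d : Int) + 1) (by omega)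
      simp only [List.foldl_cons, stepB, hg, if_pos]
      rw [ih]
      simp
      omega
    · simp only [List.foldl_cons, stepB, hg, ite_false]
      exact ih s

theorem levelStep_fold_inv (nodes : List (List Int)) (d : Nat) (f : List Int) (s : List Int × List Int) :
    (f.foldl (levelStep nodes d) s).1.length + cnt (f.foldl (levelStep nodes d) s).2 = s.1.length + cnt s.2 := by
  induction f generalizing s with
  | nil => rfl
  | cons p t ih =>
    simp only [List.foldl_cons]
    rw [ih (levelStep nodes d s p)]
    exact stepB_fold_inv d (pyget nodes p []) s

def bfsB (nodes : List (List Int)) (frontier : List Int) (d : Nat) (visited : List Int) : List Int :=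
  match frontier with
  | [] => visited
  | _ :: _ =>
    let s := frontier.foldl (levelStep nodes d) (([] : List Int), visited)
    bfsB nodes s.1 (d + 1) s.2
termination_by frontier.length + cnt visited
decreasing_by
  have h := levelStep_fold_inv nodes d frontier ([], visited)
  simp_all

-- A's inner fold on a queue `q0 ++ acc@(d+1)` is the level fold on `acc`, tagged
theorem inner_AB (d : Nat) (ns : List Int) (q0 : List (Int × Nat)) (acc v : List Int) :
    ns.foldl (stepA d) (q0 ++ acc.map (fun g => (g, d + 1)), v)
      = (q0 ++ (ns.foldl (stepB d) (acc, v)).1.map (fun g => (g, d + 1)),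
         (ns.foldl (stepB d) (acc, v)).2) := by
  induction ns generalizing acc v with
  | nil => rfl
  | cons g t ih =>
    by_cases hg : pyget v g 0 = -1
    · simp only [List.foldl_cons, stepA, stepB, hg, if_pos]
      rw [show (q0 ++ acc.map (fun g => (g, d + 1))) ++ [(g, d + 1)]
            = q0 ++ (acc ++ [g]).map (fun g => (g, d + 1)) by simp]
      exact ih (acc ++ [g]) (pyset v g ((d : Int) + 1))
    · simp only [List.foldl_cons, stepA, stepB, hg, ite_false]
      exact ih acc v

theorem bfsA_level (nodes : List (List Int)) :
    ∀ (rest acc v : List Int) (d : Nat),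
      bfsA nodes (rest.map (fun g => (g, d)) ++ acc.map (fun g => (g, d + 1))) v
        = bfsA nodes ((rest.foldl (levelStep nodes d) (acc, v)).1.map (fun g => (g, d + 1)))
            (rest.foldl (levelStep nodes d) (acc, v)).2 := by
  intro rest
  induction rest with
  | nil => intro acc v d; rfl
  | cons p ps ih =>
    intro acc v d
    rw [show ((p :: ps).map (fun g => (g, d)) ++ acc.map (fun g => (g, d + 1)))
          = (p, d) :: (ps.map (fun g => (g, d)) ++ acc.map (fun g => (g, d + 1))) by simp]
    rw [bfsA]
    rw [inner_AB d (pyget nodes p []) (ps.map (fun g => (g, d))) acc v]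
    rw [ih]
    rfl

theorem bfsA_eq_bfsB (nodes : List (List Int)) :
    ∀ (μ : Nat) (f : List Int) (d : Nat) (v : List Int), cnt v + f.length ≤ μ →
      bfsA nodes (f.map (fun g => (g, d))) v = bfsB nodes f d v := by
  intro μ
  induction μ with
  | zero =>
    intro f d v h
    cases f with
    | nil => simp only [List.map_nil]; rw [bfsA, bfsB]
    | cons a t => simp at h
  | succ μ ih =>
    intro f d v h
    cases f with
    | nil => simp only [List.map_nil]; rw [bfsA, bfsB]
    | cons a t =>
      have hstep := bfsA_level nodes (a :: t) [] v d
      simp only [List.map_nil, List.append_nil] at hstep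
      rw [hstep]
      rw [bfsB]
      have hinv := levelStep_fold_inv nodes d (a :: t) ([], v)
      simp only [List.length_nil] at hinv ⊢
      exact ih _ (d + 1) _ (by simp at h hinv ⊢; omega)

-- ---- correctness of the level BFS ----
def VisUpto (L : Nat) (nodes : List (List Int)) (t d : Nat) (v : List Int) : Prop :=
  v.length = L ∧
  (∀ i, i < L → ∀ d', d' ≤ d → minR L nodes t d' i → v.getD i 0 = (d' : Int)) ∧
  (∀ i, i < L → (∀ d', d' ≤ d → ¬ minR L nodes t d' i) → v.getD i 0 = -1)

def FrOk (L : Nat) (nodes : List (List Int)) (t d : Nat) (f : List Int) : Prop :=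
  (∀ x ∈ f, -(L : Int) ≤ x ∧ x < L) ∧
  (∀ i, (∃ x ∈ f, nrm L x = i) ↔ minR L nodes t d i)

def Mid (L : Nat) (nodes : List (List Int)) (t d : Nat) (v0 : List Int)
    (s : List Int × List Int) : Prop :=
  s.2.length = L ∧
  (∀ i, i < L → v0.getD i 0 ≠ -1 → s.2.getD i 0 = v0.getD i 0) ∧
  (∀ i, i < L → v0.getD i 0 = -1 →
      (s.2.getD i 0 = -1 ∧ ¬ ∃ x ∈ s.1, nrm L x = i) ∨
      (s.2.getD i 0 = (d : Int) + 1 ∧ minR L nodes t (d + 1) i ∧ ∃ x ∈ s.1, nrm L x = i)) ∧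
  (∀ x ∈ s.1, (-(L : Int) ≤ x ∧ x < L) ∧ v0.getD (nrm L x) 0 = -1)

theorem pyIdx_lt {len : Nat} {a : Int} {n : Nat} (h : PySem.List.pyIdx? len a = some n) :
    n < len := by
  unfold PySem.List.pyIdx? at h
  split_ifs at h <;> simp_all <;> omega

theorem getD_pyset_cases (v : List Int) (a x : Int) (c : Nat) :
    (pyset v a x).getD c 0 = v.getD c 0 ∨ (pyset v a x).getD c 0 = x := by
  unfold pyset
  cases h : PySem.List.pyIdx? v.length a with
  | none => left; rfl
  | some n =>
    by_cases hc : c = n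
    · subst hc
      right
      exact getD_set_self v c x 0 (pyIdx_lt h)
    · left
      exact getD_set_ne v c n x 0 hc

theorem stepB_keep {d : Nat} {s : List Int × List Int} {go : Int} {c : Nat}
    (h : s.2.getD c 0 ≠ -1) : (stepB d s go).2.getD c 0 ≠ -1 := by
  unfold stepB
  split_ifs with hg
  · simp only
    rcases getD_pyset_cases s.2 go ((d : Int) + 1) c with h1 | h1 <;> rw [h1]
    · exact h
    · intro hcon
      omega
  · exact h

theorem stepB_fold_keep (d : Nat) (ns : List Int) (s : List Int × List Int) (c : Nat)
    (h : s.2.getD c 0 ≠ -1) : (ns.foldl (stepB d) s).2.getD c 0 ≠ -1 := by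
  induction ns generalizing s with
  | nil => exact h
  | cons g t ih => exact ih (stepB d s g) (stepB_keep h)

-- a non-(-1) cell survives any further level processing
theorem levelStep_fold_keep {nodes : List (List Int)} {d : Nat}
    (f : List Int) (s : List Int × List Int) (c : Nat)
    (hs : s.2.getD c 0 ≠ -1) :
    (f.foldl (levelStep nodes d) s).2.getD c 0 ≠ -1 := by
  induction f generalizing s with
  | nil => exact hs
  | cons p t ih =>
    exact ih (levelStep nodes d s p) (stepB_fold_keep d (pyget nodes p []) s c hs)

-- processing (a sublist of) the neighbours of a level-d node
theorem inner_fold_mid {L : Nat} {nodes : List (List Int)} {t d : Nat} {v0 : List Int}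
    (hL : 0 < L) (hv0 : v0.length = L)
    (hvis : ∀ i, i < L → v0.getD i 0 = -1 → ∀ d', d' ≤ d → ¬ minR L nodes t d' i)
    {p : Nat} (hp : minR L nodes t d p) :
    ∀ (ns : List Int), (∀ x ∈ ns, (-(L : Int) ≤ x ∧ x < L) ∧ adjP L nodes p (nrm L x)) →
      ∀ s, Mid L nodes t d v0 s →
        Mid L nodes t d v0 (ns.foldl (stepB d) s) ∧
        ∀ x ∈ ns, (ns.foldl (stepB d) s).2.getD (nrm L x) 0 ≠ -1 := by
  intro ns
  induction ns with
  | nil => intro _ s hs; exact ⟨hs, by simp⟩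
  | cons x ns' ih =>
    intro hns s hs
    obtain ⟨hxb, hxadj⟩ := hns x (by simp)
    have hns' : ∀ y ∈ ns', (-(L : Int) ≤ y ∧ y < L) ∧ adjP L nodes p (nrm L y) :=
      fun y hy => hns y (by simp [hy])
    obtain ⟨hlen, hb, hc, hd⟩ := hs
    have hcx : nrm L x < L := nrm_lt L x hL
    have hpg : pyget s.2 x 0 = s.2.getD (nrm L x) 0 := pyget_eq x 0 hlen hxb.1 hxb.2
    simp only [List.foldl_cons]
    by_cases hg : s.2.getD (nrm L x) 0 = -1
    · have hstep : stepB d s x = (s.1 ++ [x], s.2.set (nrm L x) ((d : Int) + 1)) := by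
        unfold stepB
        rw [hpg, if_pos hg, pyset_eq x _ hlen hxb.1 hxb.2]
      have hv0x : v0.getD (nrm L x) 0 = -1 := by
        by_contra hcon
        have h1 := hb (nrm L x) hcx hcon
        rw [h1] at hg
        exact hcon hg
      have hmin' : minR L nodes t (d + 1) (nrm L x) := by
        refine ⟨⟨p, hp.1, hxadj⟩, ?_⟩
        intro d'' hd'' hre
        obtain ⟨m, hm, hminm⟩ := reach_to_min hre
        exact hvis (nrm L x) hcx hv0x m (by omega) hminm
      have hmid : Mid L nodes t d v0 (s.1 ++ [x], s.2.set (nrm L x) ((d : Int) + 1)) := by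
        refine ⟨by simp [hlen], ?_, ?_, ?_⟩
        · intro i hi hv0i
          have hne : i ≠ nrm L x := by
            intro hcon
            rw [hcon] at hv0i
            exact hv0i hv0x
          simp only
          rw [getD_set_ne _ _ _ _ _ hne]
          exact hb i hi hv0i
        · intro i hi hv0i
          by_cases hie : i = nrm L x
          · subst hie
            right
            exact ⟨getD_set_self _ _ _ _ (by omega), hmin', ⟨x, by simp, rfl⟩⟩
          · rcases hc i hi hv0i with ⟨h1, h2⟩ | ⟨h1, h2, h3⟩
            · left
              refine ⟨by simp only; rw [getD_set_ne _ _ _ _ _ hie]; exact h1, ?_⟩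
              rintro ⟨y, hy, hny⟩
              rcases List.mem_append.mp hy with hy1 | hy1
              · exact h2 ⟨y, hy1, hny⟩
              · simp at hy1
                subst hy1
                exact hie hny.symm
            · right
              refine ⟨by simp only; rw [getD_set_ne _ _ _ _ _ hie]; exact h1, h2, ?_⟩
              obtain ⟨y, hy, hny⟩ := h3
              exact ⟨y, List.mem_append.mpr (Or.inl hy), hny⟩
        · intro y hy
          rcases List.mem_append.mp hy with hy1 | hy1
          · exact hd y hy1
          · simp at hy1
            subst hy1
            exact ⟨hxb, hv0x⟩
      rw [hstep]
      obtain ⟨hmidf, hpost⟩ := ih hns' _ hmid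
      refine ⟨hmidf, ?_⟩
      intro y hy
      rcases List.mem_cons.mp hy with hy1 | hy1
      · subst hy1
        apply stepB_fold_keep
        simp only
        rw [getD_set_self _ _ _ _ (by omega)]
        intro hcon
        omega
      · exact hpost y hy1
    · have hstep : stepB d s x = s := by
        unfold stepB
        rw [hpg]
        exact if_neg hg
      rw [hstep]
      obtain ⟨hmidf, hpost⟩ := ih hns' s ⟨hlen, hb, hc, hd⟩
      refine ⟨hmidf, ?_⟩
      intro y hy
      rcases List.mem_cons.mp hy with hy1 | hy1
      · subst hy1
        exact stepB_fold_keep d ns' s (nrm L y) hg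
      · exact hpost y hy1

theorem outer_fold_mid {L : Nat} {nodes : List (List Int)} {t d : Nat} {v0 : List Int}
    (hL : 0 < L) (hv0 : v0.length = L) (hnodes : nodes.length = L)
    (hnb : ∀ i, i < L → ∀ x ∈ nbr nodes i, -(L : Int) ≤ x ∧ x < L)
    (hvis : ∀ i, i < L → v0.getD i 0 = -1 → ∀ d', d' ≤ d → ¬ minR L nodes t d' i) :
    ∀ (f : List Int), (∀ x ∈ f, (-(L : Int) ≤ x ∧ x < L) ∧ minR L nodes t d (nrm L x)) →
      ∀ s, Mid L nodes t d v0 s →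
        Mid L nodes t d v0 (f.foldl (levelStep nodes d) s) ∧
        ∀ p ∈ f, ∀ x ∈ nbr nodes (nrm L p),
          (f.foldl (levelStep nodes d) s).2.getD (nrm L x) 0 ≠ -1 := by
  intro f
  induction f with
  | nil => intro _ s hs; exact ⟨hs, by simp⟩
  | cons p f' ih =>
    intro hf s hs
    obtain ⟨hpb, hpmin⟩ := hf p (by simp)
    have hf' : ∀ x ∈ f', (-(L : Int) ≤ x ∧ x < L) ∧ minR L nodes t d (nrm L x) :=
      fun x hx => hf x (by simp [hx])
    have hpL : nrm L p < L := nrm_lt L p hL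
    have hpnbr : pyget nodes p ([] : List Int) = nbr nodes (nrm L p) :=
      pygetl_eq p [] hnodes hpb.1 hpb.2
    have hns : ∀ x ∈ nbr nodes (nrm L p),
        (-(L : Int) ≤ x ∧ x < L) ∧ adjP L nodes (nrm L p) (nrm L x) := by
      intro x hx
      exact ⟨hnb (nrm L p) hpL x hx, ⟨x, hx, rfl⟩⟩
    have hinner := inner_fold_mid hL hv0 hvis hpmin (nbr nodes (nrm L p)) hns s hs
    have hlev : levelStep nodes d s p = (nbr nodes (nrm L p)).foldl (stepB d) s := by
      unfold levelStep
      rw [hpnbr]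
    simp only [List.foldl_cons]
    rw [hlev]
    obtain ⟨hmid1, hpost1⟩ := hinner
    obtain ⟨hmidf, hpostf⟩ := ih hf' _ hmid1
    refine ⟨hmidf, ?_⟩
    intro q hq x hx
    rcases List.mem_cons.mp hq with hq1 | hq1
    · subst hq1
      exact levelStep_fold_keep f' _ (nrm L x) (hpost1 x hx)
    · exact hpostf q hq1 x hx

theorem level_trans {L : Nat} {nodes : List (List Int)} {t d : Nat} {v : List Int} {f : List Int}
    (hL : 0 < L) (ht : t < L) (hnodes : nodes.length = L)
    (hnb : ∀ i, i < L → ∀ x ∈ nbr nodes i, -(L : Int) ≤ x ∧ x < L)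
    (hvis : VisUpto L nodes t d v) (hfr : FrOk L nodes t d f) :
    VisUpto L nodes t (d + 1) (f.foldl (levelStep nodes d) ([], v)).2 ∧
      FrOk L nodes t (d + 1) (f.foldl (levelStep nodes d) ([], v)).1 := by
  obtain ⟨hvl, hv2, hv3⟩ := hvis
  obtain ⟨hfb, hfiff⟩ := hfr
  have hvis' : ∀ i, i < L → v.getD i 0 = -1 → ∀ d', d' ≤ d → ¬ minR L nodes t d' i := by
    intro i hi hneg d' hd' hmin
    have := hv2 i hi d' hd' hmin
    rw [this] at hneg
    omega
  have hfhyp : ∀ x ∈ f, (-(L : Int) ≤ x ∧ x < L) ∧ minR L nodes t d (nrm L x) := by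
    intro x hx
    exact ⟨hfb x hx, (hfiff (nrm L x)).mp ⟨x, hx, rfl⟩⟩
  have hmid0 : Mid L nodes t d v (([] : List Int), v) := by
    refine ⟨hvl, fun i _ _ => rfl, fun i hi hneg => Or.inl ⟨hneg, by simp⟩, by simp⟩
  obtain ⟨⟨hlen, hb, hc, hd⟩, hpost⟩ :=
    outer_fold_mid hL hvl hnodes hnb hvis' f hfhyp _ hmid0
  -- a cell whose minimal level is d+1 ends up set
  have hset : ∀ i, i < L → minR L nodes t (d + 1) i →
      v.getD i 0 = -1 ∧ (f.foldl (levelStep nodes d) ([], v)).2.getD i 0 ≠ -1 := by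
    intro i hi hmin
    have hvneg : v.getD i 0 = -1 := by
      by_contra hcon
      have hex : ∃ d'', d'' ≤ d ∧ minR L nodes t d'' i := by
        by_contra hcon2
        push_neg at hcon2
        exact hcon (hv3 i hi (fun d'' hd'' => hcon2 d'' hd''))
      obtain ⟨d'', hd'', hmin''⟩ := hex
      have := minR_unique hmin hmin''
      omega
    obtain ⟨j, hj, hadj⟩ := minR_pred hmin
    obtain ⟨x0, hx0, hnx0⟩ := hadj
    obtain ⟨q, hq, hnq⟩ := (hfiff j).mpr hj
    have := hpost q hq x0 (by rw [hnq]; exact hx0)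
    rw [hnx0] at this
    exact ⟨hvneg, this⟩
  constructor
  · refine ⟨hlen, ?_, ?_⟩
    · intro i hi d' hd' hmin
      rcases Nat.lt_or_ge d' (d + 1) with hlt | hge
      · have hval := hv2 i hi d' (by omega) hmin
        have hvne : v.getD i 0 ≠ -1 := by rw [hval]; intro hcon; omega
        rw [hb i hi hvne]
        exact hval
      · have hdeq : d' = d + 1 := by omega
        subst hdeq
        obtain ⟨hvneg, hfne⟩ := hset i hi hmin
        rcases hc i hi hvneg with ⟨h1, _⟩ | ⟨h1, _, _⟩
        · exact absurd h1 hfne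
        · rw [h1]
          push_cast
          ring
    · intro i hi hnone
      have hvneg : v.getD i 0 = -1 := hv3 i hi (fun d' hd' => hnone d' (by omega))
      rcases hc i hi hvneg with ⟨h1, _⟩ | ⟨_, h2, _⟩
      · exact h1
      · exact absurd h2 (hnone (d + 1) (le_refl _))
  · refine ⟨fun x hx => (hd x hx).1, ?_⟩
    intro i
    constructor
    · rintro ⟨x, hx, hnx⟩
      obtain ⟨hxb, hxv0⟩ := hd x hx
      have hxL : nrm L x < L := nrm_lt L x hL
      rcases hc (nrm L x) hxL hxv0 with ⟨_, h2⟩ | ⟨_, h2, _⟩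
      · exact absurd ⟨x, hx, rfl⟩ h2
      · exact hnx ▸ h2
    · intro hmin
      have hiL : i < L := reach_lt hL ht hmin.1
      obtain ⟨hvneg, hfne⟩ := hset i hiL hmin
      rcases hc i hiL hvneg with ⟨h1, _⟩ | ⟨_, _, h3⟩
      · exact absurd h1 hfne
      · exact h3

theorem visUpto_empty_good {L : Nat} {nodes : List (List Int)} {t d : Nat} {v : List Int}
    (hL : 0 < L) (ht : t < L)
    (hvis : VisUpto L nodes t d v) (hfr : FrOk L nodes t d ([] : List Int)) :
    GoodV L nodes t v := by
  have hnone : ∀ i, ¬ minR L nodes t d i := by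
    intro i hmin
    obtain ⟨x, hx, _⟩ := (hfr.2 i).mpr hmin
    simp at hx
  refine ⟨hvis.1, fun i hi => ⟨?_, ?_⟩⟩
  · intro m hmin
    rcases Nat.lt_or_ge m d with hlt | hge
    · exact hvis.2.1 i hi m (by omega) hmin
    · exact absurd hmin (no_min_above hnone m hge i)
  · intro hnr
    refine hvis.2.2 i hi ?_
    intro d' _ hmin
    exact hnr ⟨d', hmin.1⟩

theorem bfsB_good {L : Nat} {nodes : List (List Int)} {t : Nat}
    (hL : 0 < L) (ht : t < L) (hnodes : nodes.length = L)
    (hnb : ∀ i, i < L → ∀ x ∈ nbr nodes i, -(L : Int) ≤ x ∧ x < L) :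
    ∀ (μ : Nat) (f : List Int) (d : Nat) (v : List Int), cnt v + f.length ≤ μ →
      VisUpto L nodes t d v → FrOk L nodes t d f →
      GoodV L nodes t (bfsB nodes f d v) := by
  intro μ
  induction μ with
  | zero =>
    intro f d v hμ hvis hfr
    cases f with
    | nil =>
      rw [bfsB]
      exact visUpto_empty_good hL ht hvis hfr
    | cons a f' => simp at hμ
  | succ μ ih =>
    intro f d v hμ hvis hfr
    cases f with
    | nil =>
      rw [bfsB]
      exact visUpto_empty_good hL ht hvis hfr
    | cons a f' =>
      rw [bfsB]
      have htrans := level_trans hL ht hnodes hnb hvis hfr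
      have hinv := levelStep_fold_inv nodes d (a :: f') ([], v)
      simp only [List.length_nil] at hinv
      refine ih _ (d + 1) _ ?_ htrans.1 htrans.2
      simp at hμ hinv ⊢
      omega

-- ---- correctness of the Bellman-Ford relaxation ----
def SoundV (L : Nat) (nodes : List (List Int)) (t : Nat) (v : List Int) : Prop :=
  v.length = L ∧ ∀ i, i < L →
    v.getD i 0 = -1 ∨ ∃ d, ReachN L nodes t d i ∧ v.getD i 0 = (d : Int)

def CompK (L : Nat) (nodes : List (List Int)) (t k : Nat) (v : List Int) : Prop :=
  ∀ i, i < L → ∀ d, d ≤ k → minR L nodes t d i → v.getD i 0 = (d : Int)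

-- one direction of edge relaxation, in normalized form
def rlx (d : List Int) (i j : Nat) : List Int :=
  if d.getD i 0 ≠ -1 ∧ (d.getD j 0 = -1 ∨ d.getD i 0 + 1 < d.getD j 0)
  then d.set j (d.getD i 0 + 1) else d

theorem relaxEdge_fst_eq {L : Nat} {dist : List Int} {fl : Bool} {r : Int × Int}
    (hlen : dist.length = L)
    (hb : -(L : Int) ≤ r.1 ∧ r.1 < L ∧ -(L : Int) ≤ r.2 ∧ r.2 < L) :
    (relaxEdge (dist, fl) r).1 = rlx (rlx dist (nrm L r.1) (nrm L r.2)) (nrm L r.2) (nrm L r.1) := by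
  obtain ⟨b1, b2, b3, b4⟩ := hb
  simp only [relaxEdge]
  rw [pyget_eq (L := L) r.1 0 hlen b1 b2, pyget_eq (L := L) r.2 0 hlen b3 b4,
    pyset_eq (L := L) r.2 _ hlen b3 b4]
  unfold rlx
  by_cases c1 : dist.getD (nrm L r.1) 0 ≠ -1 ∧
      (dist.getD (nrm L r.2) 0 = -1 ∨ dist.getD (nrm L r.1) 0 + 1 < dist.getD (nrm L r.2) 0)
  · rw [if_pos c1, if_pos c1]
    simp only
    rw [pyget_eq (L := L) r.2 0 (by simp [hlen]) b3 b4,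
      pyget_eq (L := L) r.1 0 (by simp [hlen]) b1 b2,
      pyset_eq (L := L) r.1 _ (by simp [hlen]) b1 b2]
    split_ifs <;> rfl
  · rw [if_neg c1, if_neg c1]
    simp only
    rw [pyget_eq (L := L) r.2 0 hlen b3 b4, pyget_eq (L := L) r.1 0 hlen b1 b2,
      pyset_eq (L := L) r.1 _ hlen b1 b2]
    split_ifs <;> rfl

theorem length_rlx (d : List Int) (i j : Nat) : (rlx d i j).length = d.length := by
  unfold rlx; split_ifs <;> simp

-- the value rlx writes at cell j is v.getD i 0 + 1, and it only writes when it improves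
theorem getD_rlx (v : List Int) (i j c : Nat) (hj : j < v.length) :
    (rlx v i j).getD c 0 = v.getD c 0 ∨
      (c = j ∧ (rlx v i j).getD c 0 = v.getD i 0 + 1 ∧ v.getD i 0 ≠ -1 ∧
        (v.getD j 0 = -1 ∨ v.getD i 0 + 1 < v.getD j 0)) := by
  unfold rlx
  split_ifs with hc
  · by_cases hcj : c = j
    · subst hcj
      exact Or.inr ⟨rfl, getD_set_self v c _ 0 hj, hc.1, hc.2⟩
    · exact Or.inl (getD_set_ne v c j _ 0 hcj)
  · exact Or.inl rfl

theorem sound_at {L : Nat} {nodes : List (List Int)} {t : Nat} {v : List Int} {i : Nat}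
    (hs : SoundV L nodes t v) (hi : i < L) (hne : v.getD i 0 ≠ -1) :
    ∃ d, ReachN L nodes t d i ∧ v.getD i 0 = (d : Int) := by
  rcases hs.2 i hi with h | h
  · exact absurd h hne
  · exact h

theorem rlx_sound {L : Nat} {nodes : List (List Int)} {t : Nat} {v : List Int} {i j : Nat}
    (hi : i < L) (hj : j < L) (hadj : adjP L nodes i j) (hs : SoundV L nodes t v) :
    SoundV L nodes t (rlx v i j) := by
  refine ⟨by rw [length_rlx]; exact hs.1, ?_⟩
  intro c hc
  rcases getD_rlx v i j c (by rw [hs.1]; omega) with h | ⟨hcj, hval, hne, _⟩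
  · rw [h]; exact hs.2 c hc
  · subst hcj
    obtain ⟨e, he, hve⟩ := sound_at hs hi hne
    right
    exact ⟨e + 1, ⟨i, he, hadj⟩, by rw [hval, hve]; push_cast; ring⟩

theorem rlx_comp {L : Nat} {nodes : List (List Int)} {t k : Nat} {v : List Int} {i j : Nat}
    (hi : i < L) (hj : j < L) (hadj : adjP L nodes i j) (hs : SoundV L nodes t v)
    (hc : CompK L nodes t k v) : CompK L nodes t k (rlx v i j) := by
  intro c hcL d hd hmin
  rcases getD_rlx v i j c (by rw [hs.1]; omega) with h | ⟨hcj, hval, hne, himp⟩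
  · rw [h]; exact hc c hcL d hd hmin
  · subst hcj
    exfalso
    have hvj : v.getD c 0 = (d : Int) := hc c hcL d hd hmin
    obtain ⟨e, he, hve⟩ := sound_at hs hi hne
    have hreach : ReachN L nodes t (e + 1) c := ⟨i, he, hadj⟩
    have hge : d ≤ e + 1 := minR_ge_of_reach hmin hreach
    rcases himp with h | h
    · rw [hvj] at h; omega
    · rw [hvj, hve] at h; push_cast at h; omega

theorem rlx_keep {L : Nat} {nodes : List (List Int)} {t : Nat} {v : List Int} {i j c : Nat} {B : Int}
    (hi : i < L) (hs : SoundV L nodes t v) (h1 : v.getD c 0 ≠ -1) (h2 : v.getD c 0 ≤ B) :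
    (rlx v i j).getD c 0 ≠ -1 ∧ (rlx v i j).getD c 0 ≤ B := by
  by_cases hjL : j < v.length
  · rcases getD_rlx v i j c hjL with h | ⟨hcj, hval, hne, himp⟩
    · rw [h]; exact ⟨h1, h2⟩
    · subst hcj
      obtain ⟨e, _, hve⟩ := sound_at hs hi hne
      rcases himp with h | h
      · exact absurd h h1
      · rw [hval, hve]
        constructor
        · intro hcontra; push_cast at hcontra; omega
        · rw [hve] at h; omega
  · unfold rlx
    split_ifs with hcnd
    · rw [List.set_eq_of_length_le (by omega)]
      exact ⟨h1, h2⟩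
    · exact ⟨h1, h2⟩

theorem rlx_est {L : Nat} {nodes : List (List Int)} {t : Nat} {v : List Int} {i j : Nat} {m : Nat}
    (hj : j < L) (hs : SoundV L nodes t v) (hi : v.getD i 0 = (m : Int)) :
    (rlx v i j).getD j 0 ≠ -1 ∧ (rlx v i j).getD j 0 ≤ (m : Int) + 1 := by
  have hjl : j < v.length := by rw [hs.1]; omega
  unfold rlx
  split_ifs with hcnd
  · rw [getD_set_self v j _ 0 hjl, hi]
    constructor
    · intro hcontra; omega
    · omega
  · rw [hi] at hcnd
    push_neg at hcnd
    have h2 := hcnd (by intro hcontra; omega)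
    exact ⟨h2.1, by omega⟩

def cellOK (v : List Int) (c : Nat) (m : Nat) : Prop :=
  v.getD c 0 ≠ -1 ∧ v.getD c 0 ≤ (m : Int) + 1

-- per-edge hypotheses (bounds and adjacency both ways), packaged
def EdgeOk (L : Nat) (nodes : List (List Int)) (r : Int × Int) : Prop :=
  (-(L : Int) ≤ r.1 ∧ r.1 < L ∧ -(L : Int) ≤ r.2 ∧ r.2 < L) ∧
  adjP L nodes (nrm L r.1) (nrm L r.2) ∧ adjP L nodes (nrm L r.2) (nrm L r.1)

theorem relaxEdge_sc {L : Nat} {nodes : List (List Int)} {t k : Nat}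
    {s : List Int × Bool} {r : Int × Int} (hL : 0 < L) (he : EdgeOk L nodes r)
    (hs : SoundV L nodes t s.1) (hc : CompK L nodes t k s.1) :
    SoundV L nodes t (relaxEdge s r).1 ∧ CompK L nodes t k (relaxEdge s r).1 := by
  obtain ⟨hb, hadj1, hadj2⟩ := he
  have hna : nrm L r.1 < L := nrm_lt L r.1 hL
  have hnb : nrm L r.2 < L := nrm_lt L r.2 hL
  have heq : (relaxEdge s r).1 = rlx (rlx s.1 (nrm L r.1) (nrm L r.2)) (nrm L r.2) (nrm L r.1) :=
    relaxEdge_fst_eq (r := r) hs.1 hb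
  rw [heq]
  have hs1 : SoundV L nodes t (rlx s.1 (nrm L r.1) (nrm L r.2)) := rlx_sound hna hnb hadj1 hs
  have hc1 : CompK L nodes t k (rlx s.1 (nrm L r.1) (nrm L r.2)) := rlx_comp hna hnb hadj1 hs hc
  exact ⟨rlx_sound hnb hna hadj2 hs1, rlx_comp hnb hna hadj2 hs1 hc1⟩

theorem relaxEdge_keep {L : Nat} {nodes : List (List Int)} {t : Nat}
    {s : List Int × Bool} {r : Int × Int} {c m : Nat} (hL : 0 < L) (he : EdgeOk L nodes r)
    (hs : SoundV L nodes t s.1) (hok : cellOK s.1 c m) :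
    cellOK (relaxEdge s r).1 c m := by
  obtain ⟨hb, hadj1, hadj2⟩ := he
  have hna : nrm L r.1 < L := nrm_lt L r.1 hL
  have hnb : nrm L r.2 < L := nrm_lt L r.2 hL
  rw [relaxEdge_fst_eq (r := r) hs.1 hb]
  have hs1 : SoundV L nodes t (rlx s.1 (nrm L r.1) (nrm L r.2)) := rlx_sound hna hnb hadj1 hs
  have h1 := rlx_keep (j := nrm L r.2) hna hs hok.1 hok.2
  exact rlx_keep (j := nrm L r.1) hnb hs1 h1.1 h1.2

theorem fold_relax_sc {L : Nat} {nodes : List (List Int)} {t k : Nat} (hL : 0 < L) :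
    ∀ (rds : List (Int × Int)) (s : List Int × Bool), (∀ r ∈ rds, EdgeOk L nodes r) →
      SoundV L nodes t s.1 → CompK L nodes t k s.1 →
      SoundV L nodes t (rds.foldl relaxEdge s).1 ∧ CompK L nodes t k (rds.foldl relaxEdge s).1 := by
  intro rds
  induction rds with
  | nil => intro s _ hs hc; exact ⟨hs, hc⟩
  | cons r rest ih =>
    intro s hok hs hc
    have h1 := relaxEdge_sc (t := t) (k := k) hL (hok r (by simp)) hs hc
    exact ih (relaxEdge s r) (fun r' hr' => hok r' (by simp [hr'])) h1.1 h1.2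

theorem fold_relax_keep {L : Nat} {nodes : List (List Int)} {t k : Nat} (hL : 0 < L) :
    ∀ (rds : List (Int × Int)) (s : List Int × Bool) (c m : Nat),
      (∀ r ∈ rds, EdgeOk L nodes r) →
      SoundV L nodes t s.1 → CompK L nodes t k s.1 → cellOK s.1 c m →
      cellOK (rds.foldl relaxEdge s).1 c m := by
  intro rds
  induction rds with
  | nil => intro s c m _ _ _ hok; exact hok
  | cons r rest ih =>
    intro s c m hedges hs hc hok
    have h1 := relaxEdge_sc (t := t) (k := k) hL (hedges r (by simp)) hs hc
    exact ih (relaxEdge s r) c m (fun r' hr' => hedges r' (by simp [hr']))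
      h1.1 h1.2 (relaxEdge_keep hL (hedges r (by simp)) hs hok)

theorem relaxEdge_est1 {L : Nat} {nodes : List (List Int)} {t : Nat}
    {s : List Int × Bool} {r : Int × Int} {m : Nat} (hL : 0 < L) (he : EdgeOk L nodes r)
    (hs : SoundV L nodes t s.1) (hv : s.1.getD (nrm L r.1) 0 = (m : Int)) :
    cellOK (relaxEdge s r).1 (nrm L r.2) m := by
  obtain ⟨hb, hadj1, hadj2⟩ := he
  have hna : nrm L r.1 < L := nrm_lt L r.1 hL
  have hnb : nrm L r.2 < L := nrm_lt L r.2 hL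
  rw [relaxEdge_fst_eq (r := r) hs.1 hb]
  have hs1 : SoundV L nodes t (rlx s.1 (nrm L r.1) (nrm L r.2)) := rlx_sound hna hnb hadj1 hs
  have h1 := rlx_est (j := nrm L r.2) hnb hs hv
  exact rlx_keep (j := nrm L r.1) hnb hs1 h1.1 h1.2

theorem relaxEdge_est2 {L : Nat} {nodes : List (List Int)} {t : Nat}
    {s : List Int × Bool} {r : Int × Int} {m : Nat} (hL : 0 < L) (he : EdgeOk L nodes r)
    (hs : SoundV L nodes t s.1) (hv : s.1.getD (nrm L r.2) 0 = (m : Int)) :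
    cellOK (relaxEdge s r).1 (nrm L r.1) m := by
  obtain ⟨hb, hadj1, hadj2⟩ := he
  have hna : nrm L r.1 < L := nrm_lt L r.1 hL
  have hnb : nrm L r.2 < L := nrm_lt L r.2 hL
  rw [relaxEdge_fst_eq (r := r) hs.1 hb]
  have hs1 : SoundV L nodes t (rlx s.1 (nrm L r.1) (nrm L r.2)) := rlx_sound hna hnb hadj1 hs
  -- the r.2 cell keeps a value ≤ m through the first relaxation …
  have h1 : (rlx s.1 (nrm L r.1) (nrm L r.2)).getD (nrm L r.2) 0 ≠ -1 ∧
      (rlx s.1 (nrm L r.1) (nrm L r.2)).getD (nrm L r.2) 0 ≤ (m : Int) :=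
    rlx_keep (j := nrm L r.2) hna hs (by rw [hv]; intro h; omega) (le_of_eq hv)
  -- … and by soundness it is some reachable length e ≤ m
  obtain ⟨e, he', hve⟩ := sound_at hs1 hnb h1.1
  have hem : (e : Int) ≤ (m : Int) := by rw [← hve]; exact h1.2
  have h2 := rlx_est (j := nrm L r.1) hna hs1 hve
  exact ⟨h2.1, le_trans h2.2 (by omega)⟩

-- after one whole sweep: soundness and level-k values are kept, and every edge whose one
-- endpoint is settled at level m ≤ k has pushed m+1 across
theorem pass_fold_claims {L : Nat} {nodes : List (List Int)} {t k : Nat} (hL : 0 < L) :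
    ∀ (rds : List (Int × Int)) (s : List Int × Bool), (∀ r ∈ rds, EdgeOk L nodes r) →
      SoundV L nodes t s.1 → CompK L nodes t k s.1 →
      ∀ r ∈ rds, ∀ m, m ≤ k →
        (minR L nodes t m (nrm L r.1) → cellOK (rds.foldl relaxEdge s).1 (nrm L r.2) m) ∧
        (minR L nodes t m (nrm L r.2) → cellOK (rds.foldl relaxEdge s).1 (nrm L r.1) m) := by
  intro rds
  induction rds with
  | nil => intro s _ _ _ r hr; simp at hr
  | cons r0 rest ih =>
    intro s hedges hs hc r hr m hm
    have he0 := hedges r0 (by simp)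
    have h1 := relaxEdge_sc (t := t) (k := k) hL he0 hs hc
    have hrest : ∀ r' ∈ rest, EdgeOk L nodes r' := fun r' hr' => hedges r' (by simp [hr'])
    rcases List.mem_cons.mp hr with hr0 | hrr
    · subst hr0
      constructor
      · intro hmin
        have hval : s.1.getD (nrm L r.1) 0 = (m : Int) :=
          hc (nrm L r.1) (nrm_lt L r.1 hL) m hm hmin
        have hest := relaxEdge_est1 (t := t) hL he0 hs hval
        simp only [List.foldl_cons]
        exact fold_relax_keep (t := t) (k := k) hL rest (relaxEdge s r) _ m hrest h1.1 h1.2 hest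
      · intro hmin
        have hval : s.1.getD (nrm L r.2) 0 = (m : Int) :=
          hc (nrm L r.2) (nrm_lt L r.2 hL) m hm hmin
        have hest := relaxEdge_est2 (t := t) hL he0 hs hval
        simp only [List.foldl_cons]
        exact fold_relax_keep (t := t) (k := k) hL rest (relaxEdge s r) _ m hrest h1.1 h1.2 hest
    · simpa only [List.foldl_cons] using ih (relaxEdge s r0) hrest h1.1 h1.2 r hrr m hm

theorem adj_to_road {N : Int} {roads : List (Int × Int)} {L : Nat}
    (hLdef : L = (N + 1).toNat) (hL : 0 < L) (hb : RB L roads) {j i : Nat}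
    (h : adjP L (buildNodes N roads) j i) :
    ∃ r ∈ roads, (nrm L r.1 = j ∧ nrm L r.2 = i) ∨ (nrm L r.2 = j ∧ nrm L r.1 = i) := by
  obtain ⟨x, hx, hxi⟩ := h
  rw [mem_nbr_buildNodes hLdef hL hb j x] at hx
  obtain ⟨r, hr, hcase⟩ := hx
  rcases hcase with ⟨h1, h2⟩ | ⟨h1, h2⟩
  · exact ⟨r, hr, Or.inl ⟨h1, by rw [← hxi, h2]⟩⟩
  · exact ⟨r, hr, Or.inr ⟨h1, by rw [← hxi, h2]⟩⟩

theorem edges_ok {N : Int} {roads : List (Int × Int)} {L : Nat}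
    (hLdef : L = (N + 1).toNat) (hL : 0 < L) (hb : RB L roads) :
    ∀ r ∈ roads, EdgeOk L (buildNodes N roads) r := by
  intro r hr
  exact ⟨hb r hr, (road_adj hLdef hL hb hr).1, (road_adj hLdef hL hb hr).2⟩

theorem pass_succ {N : Int} {roads : List (Int × Int)} {L t k : Nat} {dist : List Int}
    (hLdef : L = (N + 1).toNat) (hL : 0 < L) (ht : t < L) (hb : RB L roads)
    (hs : SoundV L (buildNodes N roads) t dist) (hc : CompK L (buildNodes N roads) t k dist) :
    SoundV L (buildNodes N roads) t (passB roads dist).1 ∧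
      CompK L (buildNodes N roads) t (k + 1) (passB roads dist).1 := by
  unfold passB
  have hedges := edges_ok hLdef hL hb
  have hsc := fold_relax_sc (t := t) (k := k) hL roads (dist, false) hedges hs hc
  have hclaims := pass_fold_claims (t := t) (k := k) hL roads (dist, false) hedges hs hc
  refine ⟨hsc.1, ?_⟩
  intro i hi d hd hmin
  rcases Nat.lt_or_ge d (k + 1) with hdk | hdk
  · exact hsc.2 i hi d (by omega) hmin
  · have hdeq : d = k + 1 := by omega
    subst hdeq
    obtain ⟨j, hj, hadj⟩ := minR_pred hmin
    obtain ⟨r, hr, hcase⟩ := adj_to_road hLdef hL hb hadj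
    have hok : cellOK (passB roads dist).1 i k := by
      rcases hcase with ⟨h1, h2⟩ | ⟨h1, h2⟩
      · have := (hclaims r hr k (le_refl k)).1 (h1 ▸ hj)
        rwa [h2] at this
      · have := (hclaims r hr k (le_refl k)).2 (h1 ▸ hj)
        rwa [h2] at this
    obtain ⟨e, he, hve⟩ := sound_at hsc.1 hi hok.1
    have hge : k + 1 ≤ e := minR_ge_of_reach hmin he
    have hle : (e : Int) ≤ (k : Int) + 1 := by rw [← hve]; exact hok.2
    rw [hve]
    have : e = k + 1 := by omega
    rw [this]

-- ---- the break: a sweep that changes nothing is a fixpoint ----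
theorem relaxEdge_flag_false {s : List Int × Bool} {r : Int × Int}
    (h : (relaxEdge s r).2 = false) : relaxEdge s r = s ∧ s.2 = false := by
  unfold relaxEdge at h ⊢
  by_cases c1 : pyget s.1 r.1 0 ≠ -1 ∧
      (pyget s.1 r.2 0 = -1 ∨ pyget s.1 r.1 0 + 1 < pyget s.1 r.2 0)
  · rw [if_pos c1] at h
    simp only at h
    split_ifs at h
  · rw [if_neg c1] at h ⊢
    simp only at h ⊢
    split_ifs at h ⊢ with c2
    exact ⟨rfl, h⟩

theorem fold_relax_flag : ∀ (rds : List (Int × Int)) (s : List Int × Bool),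
    (rds.foldl relaxEdge s).2 = false →
    rds.foldl relaxEdge s = s ∧ s.2 = false ∧ ∀ r ∈ rds, relaxEdge s r = s := by
  intro rds
  induction rds with
  | nil => intro s h; exact ⟨rfl, h, by simp⟩
  | cons r rest ih =>
    intro s h
    simp only [List.foldl_cons] at h ⊢
    obtain ⟨hfold, hflag, hall⟩ := ih (relaxEdge s r) h
    obtain ⟨heq, hflag0⟩ := relaxEdge_flag_false hflag
    refine ⟨by rw [heq] at hfold ⊢; exact hfold, hflag0, ?_⟩
    intro r' hr'
    rcases List.mem_cons.mp hr' with h1 | h1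
    · subst h1; exact heq
    · rw [← heq]; exact hall r' h1

-- a no-op edge at a settled endpoint bounds the other endpoint
theorem fix_edge {L : Nat} {dist : List Int} {r : Int × Int}
    (hlen : dist.length = L)
    (hb : -(L : Int) ≤ r.1 ∧ r.1 < L ∧ -(L : Int) ≤ r.2 ∧ r.2 < L)
    (h : relaxEdge (dist, false) r = (dist, false)) :
    (dist.getD (nrm L r.1) 0 ≠ -1 →
      dist.getD (nrm L r.2) 0 ≠ -1 ∧ dist.getD (nrm L r.2) 0 ≤ dist.getD (nrm L r.1) 0 + 1) ∧
    (dist.getD (nrm L r.2) 0 ≠ -1 →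
      dist.getD (nrm L r.1) 0 ≠ -1 ∧ dist.getD (nrm L r.1) 0 ≤ dist.getD (nrm L r.2) 0 + 1) := by
  obtain ⟨b1, b2, b3, b4⟩ := hb
  unfold relaxEdge at h
  rw [pyget_eq (L := L) r.1 0 hlen b1 b2, pyget_eq (L := L) r.2 0 hlen b3 b4] at h
  by_cases c1 : dist.getD (nrm L r.1) 0 ≠ -1 ∧
      (dist.getD (nrm L r.2) 0 = -1 ∨ dist.getD (nrm L r.1) 0 + 1 < dist.getD (nrm L r.2) 0)
  · rw [if_pos c1] at h
    simp only at h
    split_ifs at h <;> simp_all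
  · rw [if_neg c1] at h
    simp only at h
    split_ifs at h with c2
    · simp_all
    · rw [pyget_eq (L := L) r.1 0 hlen b1 b2, pyget_eq (L := L) r.2 0 hlen b3 b4] at c2
      push_neg at c1 c2
      constructor
      · intro h1
        obtain ⟨ha, hb'⟩ := c1 h1
        exact ⟨ha, by omega⟩
      · intro h2
        obtain ⟨ha, hb'⟩ := c2 h2
        exact ⟨ha, by omega⟩

theorem fix_complete {N : Int} {roads : List (Int × Int)} {L t c : Nat} {dist : List Int}
    (hLdef : L = (N + 1).toNat) (hL : 0 < L) (ht : t < L) (hb : RB L roads)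
    (hs : SoundV L (buildNodes N roads) t dist) (hc : CompK L (buildNodes N roads) t c dist)
    (hfix : ∀ r ∈ roads, relaxEdge (dist, false) r = (dist, false)) :
    ∀ m i, i < L → minR L (buildNodes N roads) t m i → dist.getD i 0 = (m : Int) := by
  intro m
  induction m with
  | zero => intro i hi hmin; exact hc i hi 0 (Nat.zero_le c) hmin
  | succ m ih =>
    intro i hi hmin
    obtain ⟨j, hj, hadj⟩ := minR_pred hmin
    have hjL : j < L := reach_lt hL ht hj.1
    have hjval : dist.getD j 0 = (m : Int) := ih j hjL hj
    obtain ⟨r, hr, hcase⟩ := adj_to_road hLdef hL hb hadj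
    have hfe := fix_edge hs.1 (hb r hr) (hfix r hr)
    have hok : dist.getD i 0 ≠ -1 ∧ dist.getD i 0 ≤ (m : Int) + 1 := by
      rcases hcase with ⟨h1, h2⟩ | ⟨h1, h2⟩
      · rw [← h2]
        have := hfe.1 (by rw [h1, hjval]; intro hcon; omega)
        rw [h1, hjval] at this
        exact this
      · rw [← h2]
        have := hfe.2 (by rw [h1, hjval]; intro hcon; omega)
        rw [h1, hjval] at this
        exact this
    obtain ⟨e, he, hve⟩ := sound_at hs hi hok.1
    have hge : m + 1 ≤ e := minR_ge_of_reach hmin he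
    have hle : (e : Int) ≤ (m : Int) + 1 := by rw [← hve]; exact hok.2
    rw [hve]
    have : e = m + 1 := by omega
    rw [this]

-- ---- every reachable node is reachable within L-1 steps (walk shortening) ----
def IsWalk (L : Nat) (nodes : List (List Int)) (t : Nat) (l : List Nat) (i : Nat) : Prop :=
  l.head? = some t ∧ l.getLast? = some i ∧ List.IsChain (adjP L nodes) l ∧ ∀ x ∈ l, x < L

theorem reach_walk {L : Nat} {nodes : List (List Int)} {t : Nat} (hL : 0 < L) (ht : t < L) :
    ∀ (d i : Nat), ReachN L nodes t d i →
      ∃ l, IsWalk L nodes t l i ∧ l.length = d + 1 := by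
  intro d
  induction d with
  | zero =>
    intro i h
    simp only [ReachN] at h
    refine ⟨[i], ⟨by simp [h], rfl, List.IsChain.singleton i, ?_⟩, rfl⟩
    intro x hx
    simp at hx
    rw [hx, h]
    exact ht
  | succ d ih =>
    intro i h
    obtain ⟨j, hj, hadj⟩ := h
    obtain ⟨l, ⟨hh, hl, hc, hel⟩, hlen⟩ := ih j hj
    have hne : l ≠ [] := by intro hcon; rw [hcon] at hh; simp at hh
    refine ⟨l ++ [i], ⟨?_, ?_, ?_, ?_⟩, by simp [hlen]⟩
    · cases l with
      | nil => exact absurd rfl hne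
      | cons a l' => simpa using hh
    · simp
    · refine List.isChain_append.mpr ⟨hc, List.IsChain.singleton i, ?_⟩
      intro x hx y hy
      simp at hy
      rw [hl] at hx
      simp at hx
      subst hx
      subst hy
      exact hadj
    · intro x hx
      have hre : ReachN L nodes t (d + 1) i := ⟨j, hj, hadj⟩
      rcases List.mem_append.mp hx with h1 | h1
      · exact hel x h1
      · simp at h1
        rw [h1]
        exact reach_lt hL ht hre

theorem walk_reach {L : Nat} {nodes : List (List Int)} {t : Nat} :
    ∀ (l : List Nat) (i : Nat), IsWalk L nodes t l i → ReachN L nodes t (l.length - 1) i := by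
  intro l
  induction l using List.reverseRecOn with
  | nil => intro i hw; simp [IsWalk] at hw
  | append_singleton l x ih =>
    intro i hw
    obtain ⟨hh, hl, hc, hel⟩ := hw
    have hx : x = i := by simpa using hl
    subst hx
    cases l with
    | nil =>
      have : x = t := by simpa using hh
      subst this
      simpa [ReachN] using rfl
    | cons a l' =>
      have hne : (a :: l') ≠ [] := by simp
      obtain ⟨j, hjl⟩ : ∃ j, (a :: l').getLast? = some j :=
        ⟨(a :: l').getLast hne, List.getLast?_eq_some_getLast hne⟩
      have hdec := List.isChain_append.mp hc
      have hwalk : IsWalk L nodes t (a :: l') j := by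
        refine ⟨by simpa using hh, hjl, hdec.1, ?_⟩
        intro y hy
        exact hel y (List.mem_append.mpr (Or.inl hy))
      have hr := ih j hwalk
      have hadj : adjP L nodes j x := by
        have := hdec.2.2 j (by rw [hjl]; simp) x (by simp)
        exact this
      have : ReachN L nodes t ((a :: l').length - 1 + 1) x := ⟨j, hr, hadj⟩
      simpa using this

theorem walk_shorten {L : Nat} {nodes : List (List Int)} {t : Nat} {l : List Nat} {i : Nat}
    (hw : IsWalk L nodes t l i) (hnd : ¬ l.Nodup) :
    ∃ l', IsWalk L nodes t l' i ∧ l'.length < l.length := by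
  obtain ⟨hh, hl, hc, hel⟩ := hw
  obtain ⟨x, hdup⟩ := List.exists_duplicate_iff_not_nodup.mpr hnd
  have hsub : ([x] ++ [x]).Sublist l := by
    simpa using List.duplicate_iff_sublist.mp hdup
  rw [List.append_sublist_iff] at hsub
  obtain ⟨r1, r2, hleq, h1, h2⟩ := hsub
  obtain ⟨l1, l2, h3⟩ := List.append_of_mem (List.singleton_sublist.mp h1)
  obtain ⟨l2', l3, h4⟩ := List.append_of_mem (List.singleton_sublist.mp h2)
  have hldecomp : l = (l1 ++ (x :: (l2 ++ l2'))) ++ (x :: l3) := by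
    rw [hleq, h3, h4]
    simp
  refine ⟨l1 ++ (x :: l3), ⟨?_, ?_, ?_, ?_⟩, ?_⟩
  · rw [hldecomp] at hh
    cases l1 with
    | nil => simpa using hh
    | cons b l1' => simpa using hh
  · rw [hldecomp] at hl
    rw [List.getLast?_append_cons] at hl
    rw [List.getLast?_append_cons]
    exact hl
  · rw [hldecomp] at hc
    have hd1 := List.isChain_append.mp hc
    have hd2 := List.isChain_append.mp hd1.1
    refine List.isChain_append.mpr ⟨hd2.1, hd1.2.1, ?_⟩
    intro u hu y hy
    simp at hy
    subst hy
    exact hd2.2.2 u hu x (by simp)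
  · intro y hy
    apply hel
    rw [hldecomp]
    rcases List.mem_append.mp hy with h | h
    · simp [h]
    · simp at h
      rcases h with h | h <;> simp [h]
  · rw [hldecomp]
    simp
    omega

theorem nodup_len_le {L : Nat} {l : List Nat} (hnd : l.Nodup) (hel : ∀ x ∈ l, x < L) :
    l.length ≤ L := by
  have hcard : l.toFinset.card = l.length := List.toFinset_card_of_nodup hnd
  have hsub : l.toFinset ⊆ Finset.range L := by
    intro x hx
    exact Finset.mem_range.mpr (hel x (List.mem_toFinset.mp hx))
  have := Finset.card_le_card hsub
  rw [hcard, Finset.card_range] at this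
  exact this

theorem reach_bound {L : Nat} {nodes : List (List Int)} {t : Nat} (hL : 0 < L) (ht : t < L)
    {d i : Nat} (h : ReachN L nodes t d i) : ∃ d', d' ≤ L - 1 ∧ ReachN L nodes t d' i := by
  obtain ⟨l, hw, hlen⟩ := reach_walk hL ht d i h
  clear hlen h
  have aux : ∀ (n : Nat) (l : List Nat), l.length ≤ n → IsWalk L nodes t l i →
      ∃ d', d' ≤ L - 1 ∧ ReachN L nodes t d' i := by
    intro n
    induction n with
    | zero =>
      intro l hlen hw
      have : l = [] := List.eq_nil_of_length_eq_zero (by omega)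
      rw [this] at hw
      simp [IsWalk] at hw
    | succ n ih =>
      intro l hlen hw
      by_cases hnd : l.Nodup
      · have hbound := nodup_len_le hnd hw.2.2.2
        have hr := walk_reach l i hw
        have hne : l ≠ [] := by
          intro hcon
          rw [hcon] at hw
          simp [IsWalk] at hw
        have hpos : 1 ≤ l.length := by
          cases l with
          | nil => exact absurd rfl hne
          | cons a l' => simp
        exact ⟨l.length - 1, by omega, hr⟩
      · obtain ⟨l', hw', hlt⟩ := walk_shorten hw hnd
        exact ih l' (by omega) hw'
  exact aux l.length l (le_refl _) hw

theorem minR_le_bound {L : Nat} {nodes : List (List Int)} {t : Nat} (hL : 0 < L) (ht : t < L)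
    {d i : Nat} (h : minR L nodes t d i) : d ≤ L - 1 := by
  obtain ⟨d', hd', hr⟩ := reach_bound hL ht h.1
  exact le_trans (minR_ge_of_reach h hr) hd'

-- ---- the whole relaxation loop computes the BFS distances ----
theorem roundsB_good {N : Int} {roads : List (Int × Int)} {L t : Nat}
    (hLdef : L = (N + 1).toNat) (hL : 0 < L) (ht : t < L) (hb : RB L roads) :
    ∀ (k c : Nat) (dist : List Int),
      SoundV L (buildNodes N roads) t dist → CompK L (buildNodes N roads) t c dist →
      L - 1 ≤ c + k → GoodV L (buildNodes N roads) t (roundsB roads k dist) := by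
  intro k
  induction k with
  | zero =>
    intro c dist hs hc hbound
    simp only [roundsB]
    refine ⟨hs.1, fun i hi => ⟨?_, ?_⟩⟩
    · intro d hmin
      exact hc i hi d (by have := minR_le_bound hL ht hmin; omega) hmin
    · intro hnr
      rcases hs.2 i hi with h | ⟨d, hd, _⟩
      · exact h
      · exact absurd ⟨d, hd⟩ hnr
  | succ k ih =>
    intro c dist hs hc hbound
    simp only [roundsB]
    cases hfl : (passB roads dist).2 with
    | true =>
      rw [if_pos rfl]
      have hp := pass_succ hLdef hL ht hb hs hc
      exact ih (c + 1) _ hp.1 hp.2 (by omega)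
    | false =>
      rw [if_neg (by simp)]
      have hflag : (roads.foldl relaxEdge (dist, false)).2 = false := hfl
      obtain ⟨hfold, _, hfix⟩ := fold_relax_flag roads (dist, false) hflag
      have hfst : (passB roads dist).1 = dist := by
        unfold passB
        rw [hfold]
      rw [hfst]
      have hcomp := fix_complete hLdef hL ht hb hs hc hfix
      refine ⟨hs.1, fun i hi => ⟨?_, ?_⟩⟩
      · intro d hmin
        exact hcomp d i hi hmin
      · intro hnr
        rcases hs.2 i hi with h | ⟨d, hd, _⟩
        · exact h
        · exact absurd ⟨d, hd⟩ hnr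

-- the initial array, shared by both ports: everything -1 except destination = 0
theorem init_getD {L t : Nat} (hL : 0 < L) (ht : t < L) (i : Nat) (hi : i < L) :
    ((List.replicate L (-1 : Int)).set t 0).getD i 0 = if i = t then 0 else -1 := by
  by_cases hit : i = t
  · rw [if_pos hit, hit]
    exact getD_set_self _ _ _ _ (by simp; omega)
  · rw [if_neg hit, getD_set_ne _ _ _ _ _ hit]
    simp [List.getD, List.getElem?_replicate, hi]

-- ===== VERDICT (by name: the statement is the Claim_ definition above) =====
theorem solution_spec : Claim_equal_solution := by
  intro N roads sources destination hdom hpre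
  obtain ⟨hN, hroads, ⟨hdl, hdr⟩, hsrc⟩ := hpre
  unfold Spec_solution solution solution_alt
  dsimp only
  set L := (N + 1).toNat with hLdef
  have hL : 0 < L := by omega
  have hLI : (L : Int) = N + 1 := by omega
  have hb : RB L roads := by
    intro r hr
    obtain ⟨a1, a2, a3, a4⟩ := hroads r hr
    exact ⟨by omega, by omega, by omega, by omega⟩
  have hdb1 : -(L : Int) ≤ destination := by omega
  have hdb2 : destination < L := by omega
  set nodes := buildNodes N roads with hnodesdef
  have hnlen : nodes.length = L := length_buildNodes N roads
  set t := nrm L destination with htdef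
  have ht : t < L := nrm_lt L destination hL
  have hnb : ∀ i, i < L → ∀ x ∈ nbr nodes i, -(L : Int) ≤ x ∧ x < L :=
    fun i _ x hx => nbr_bounds hLdef hL hb i x hx
  have hreplen : (List.replicate L (-1 : Int)).length = L := by simp
  have hinit : pyset (List.replicate L (-1 : Int)) destination 0
      = (List.replicate L (-1 : Int)).set t 0 := pyset_eq destination 0 hreplen hdb1 hdb2
  set init := (List.replicate L (-1 : Int)).set t 0 with hinitdef
  have hinitlen : init.length = L := by simp [hinitdef]
  have hinitget : ∀ i, i < L → init.getD i 0 = if i = t then 0 else -1 :=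
    fun i hi => init_getD hL ht i hi
  have hmin0 : minR L nodes t 0 t :=
    ⟨by simp [ReachN], fun d' hd' => absurd hd' (Nat.not_lt_zero d')⟩
  have hvis0 : VisUpto L nodes t 0 init := by
    refine ⟨hinitlen, ?_, ?_⟩
    · intro i hi d' hd' hmin
      have hd0 : d' = 0 := by omega
      subst hd0
      have hit : i = t := by simpa [ReachN] using hmin.1
      rw [hinitget i hi, if_pos hit]
      simp
    · intro i hi hno
      have hit : i ≠ t := by
        intro hcon
        exact hno 0 (le_refl 0) (hcon ▸ hmin0)
      rw [hinitget i hi, if_neg hit]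
  have hfr0 : FrOk L nodes t 0 [destination] := by
    constructor
    · intro x hx
      simp at hx
      subst hx
      exact ⟨hdb1, hdb2⟩
    · intro i
      constructor
      · rintro ⟨x, hx, hnx⟩
        simp at hx
        subst hx
        exact hnx ▸ hmin0
      · intro hmin
        have hit : i = t := by simpa [ReachN] using hmin.1
        exact ⟨destination, by simp, hit.symm⟩
  have hgoodA : GoodV L nodes t (bfsB nodes [destination] 0 init) :=
    bfsB_good hL ht hnlen hnb (cnt init + 1) [destination] 0 init (by simp) hvis0 hfr0
  have hAeq : bfsA nodes [(destination, 0)] init = bfsB nodes [destination] 0 init := by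
    have := bfsA_eq_bfsB nodes (cnt init + 1) [destination] 0 init (by simp)
    simpa using this
  have hsound0 : SoundV L nodes t init := by
    refine ⟨hinitlen, ?_⟩
    intro i hi
    by_cases hit : i = t
    · right
      exact ⟨0, by simp [ReachN, hit], by rw [hinitget i hi, if_pos hit]; simp⟩
    · left
      rw [hinitget i hi, if_neg hit]
  have hcomp0 : CompK L nodes t 0 init := by
    intro i hi d hd hmin
    have hd0 : d = 0 := by omega
    subst hd0
    have hit : i = t := by simpa [ReachN] using hmin.1
    rw [hinitget i hi, if_pos hit]
    simp
  have hgoodB : GoodV L nodes t (roundsB roads N.toNat init) :=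
    roundsB_good hLdef hL ht hb N.toNat 0 init hsound0 hcomp0 (by omega)
  have hveq : bfsB nodes [destination] 0 init = roundsB roads N.toNat init :=
    goodV_unique hgoodA hgoodB
  rw [hinit, hAeq, hveq, PySem.List.foldl_append_singleton_eq_map]
  simp
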